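-- pv_equiv track=rewrite | github.com/techjira/poisense | poisenseapp/database_extract.py | human_senses
-- ===== SOURCE A (Python) =====
-- def human_senses(id,statement):
--     eye = []
--     inhale = []
--     skin = []
--     ingestion = []
--     other = []
--     if id == 'hs':
--         val1 = 'respiratory'
--     else:
--         val1 = 'breath'
--
--     for hs in statement:
--         hs = hs.lower()
--         if "eye" in hs:
--             eye.append(hs)
--         elif "skin" in hs:
--             skin.append(hs)
--         elif 'swallow' in hs:
--             ingestion.append(hs)
--         elif "inhale" in hs:
--             inhale.append(hs)
--         elif "burns" in hs:
--             skin.append(hs)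
--         elif "hair" in hs:
--             skin.append(hs)
--         elif "respiratory" in hs:
--             inhale.append(hs)
--         elif "breath" in hs:
--             inhale.append(hs)
--         elif "fire" in hs:
--             other.append("In case of fire: extinguish appropriately")
--         else:
--             other.append(hs)
--
--     # capitalizing the first letter of sentences
--     eye = [x.capitalize() for x in eye]
--     skin = [x.capitalize() for x in skin]
--     ingestion = [x.capitalize() for x in ingestion]
--     inhale = [x.capitalize() for x in inhale]
--     other = [x.capitalize() for x in other]
--
--     eye = ' '.join(eye)
--     skin = ' '.join(skin)
--     inhale = ' '.join(inhale)
--     ingestion = ' '.join(ingestion)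
--     other = ' '.join(other)
--     return eye, skin, inhale, ingestion, other
-- ===== SOURCE B (Python) =====
-- FIRE_TEXT = "In case of fire: extinguish appropriately"
--
-- def _cat(h):
--     # pure classifier preserving A's first-match priority; codes:
--     # 0=eye 1=skin 2=inhale 3=ingestion 4=other 5=fire-sentinel
--     if "eye" in h: return 0
--     if "skin" in h: return 1
--     if "swallow" in h: return 3
--     if "inhale" in h: return 2
--     if "burns" in h: return 1
--     if "hair" in h: return 1
--     if "respiratory" in h: return 2
--     if "breath" in h: return 2
--     if "fire" in h: return 5
--     return 4
--
-- def human_senses(id, statement):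
--     lows = [s.lower() for s in statement]
--     def bucket(accept):
--         return " ".join(
--             (FIRE_TEXT if _cat(h) == 5 else h).capitalize()
--             for h in lows if _cat(h) in accept)
--     return (bucket([0]), bucket([1]), bucket([2]), bucket([3]), bucket([4, 5]))
-- ===== Notes on version B (the rewrite author's own statement) =====
-- stated objective: alternative
-- what changed: Replaces A's single-pass loop appending into five mutable accumulator lists by a pure per-statement classifier plus five independent filter-and-join passes over the lowercased statements (staged map/filter decomposition), dropping the unused val1.
import Mathlib
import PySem

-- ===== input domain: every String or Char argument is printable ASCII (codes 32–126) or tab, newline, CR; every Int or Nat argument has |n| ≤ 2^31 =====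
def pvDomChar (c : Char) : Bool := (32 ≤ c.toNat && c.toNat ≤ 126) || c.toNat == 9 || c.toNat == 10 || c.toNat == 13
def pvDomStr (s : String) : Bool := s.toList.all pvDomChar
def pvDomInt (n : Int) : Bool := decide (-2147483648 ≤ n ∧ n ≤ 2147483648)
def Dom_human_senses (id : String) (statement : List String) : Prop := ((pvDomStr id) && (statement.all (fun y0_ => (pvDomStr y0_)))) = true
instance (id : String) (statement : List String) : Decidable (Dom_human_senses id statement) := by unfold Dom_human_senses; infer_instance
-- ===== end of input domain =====

-- B replaces A's single-pass loop over five mutable accumulators by a pure per-statement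
-- classifier plus five independent filter-and-join passes (objective: alternative decomposition).

-- shared helper: Python str.capitalize() on ASCII text (first char uppercased, rest lowercased)
def pvCap (cs : List Char) : List Char :=
  match cs with
  | [] => []
  | c :: rest => PySem.Chars.upperChar c :: PySem.Chars.lower rest

-- ===== PORT A =====
def humanStepA
    (st : List (List Char) × List (List Char) × List (List Char) × List (List Char) × List (List Char))
    (s : String) :
    List (List Char) × List (List Char) × List (List Char) × List (List Char) × List (List Char) :=
  let (eye, skin, inhale, ingestion, other) := st
  let hs := PySem.Chars.lower s.toList
  if PySem.Chars.isIn "eye".toList hs then (eye ++ [hs], skin, inhale, ingestion, other)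
  else if PySem.Chars.isIn "skin".toList hs then (eye, skin ++ [hs], inhale, ingestion, other)
  else if PySem.Chars.isIn "swallow".toList hs then (eye, skin, inhale, ingestion ++ [hs], other)
  else if PySem.Chars.isIn "inhale".toList hs then (eye, skin, inhale ++ [hs], ingestion, other)
  else if PySem.Chars.isIn "burns".toList hs then (eye, skin ++ [hs], inhale, ingestion, other)
  else if PySem.Chars.isIn "hair".toList hs then (eye, skin ++ [hs], inhale, ingestion, other)
  else if PySem.Chars.isIn "respiratory".toList hs then (eye, skin, inhale ++ [hs], ingestion, other)
  else if PySem.Chars.isIn "breath".toList hs then (eye, skin, inhale ++ [hs], ingestion, other)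
  else if PySem.Chars.isIn "fire".toList hs then
    (eye, skin, inhale, ingestion, other ++ ["In case of fire: extinguish appropriately".toList])
  else (eye, skin, inhale, ingestion, other ++ [hs])

def human_senses (id : String) (statement : List String) : String × String × String × String × String :=
  -- val1 := if id == "hs" then "respiratory" else "breath" is computed and never used in A; dropped.
  let st := statement.foldl humanStepA ([], [], [], [], [])
  let (eye, skin, inhale, ingestion, other) := st
  let fmt := fun (b : List (List Char)) => String.mk (PySem.Chars.join [' '] (b.map pvCap))
  (fmt eye, fmt skin, fmt inhale, fmt ingestion, fmt other)

-- ===== PORT B =====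
def pvFireText : List Char := "In case of fire: extinguish appropriately".toList

-- pure classifier preserving A's first-match priority; codes:
-- 0=eye 1=skin 2=inhale 3=ingestion 4=other 5=fire-sentinel
def pvCat (h : List Char) : Nat :=
  if PySem.Chars.isIn "eye".toList h then 0
  else if PySem.Chars.isIn "skin".toList h then 1
  else if PySem.Chars.isIn "swallow".toList h then 3
  else if PySem.Chars.isIn "inhale".toList h then 2
  else if PySem.Chars.isIn "burns".toList h then 1
  else if PySem.Chars.isIn "hair".toList h then 1
  else if PySem.Chars.isIn "respiratory".toList h then 2
  else if PySem.Chars.isIn "breath".toList h then 2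
  else if PySem.Chars.isIn "fire".toList h then 5
  else 4

def pvText (h : List Char) : List Char := if pvCat h = 5 then pvFireText else h

-- one filter-and-map pass of B over the lowercased statements
def pvSel (accept : List Nat) (lows : List (List Char)) : List (List Char) :=
  (lows.filter (fun h => accept.contains (pvCat h))).map pvText

def human_senses_alt (id : String) (statement : List String) : String × String × String × String × String :=
  let lows := statement.map (fun s => PySem.Chars.lower s.toList)
  let bucket := fun (accept : List Nat) =>
    String.mk (PySem.Chars.join [' '] ((pvSel accept lows).map pvCap))
  (bucket [0], bucket [1], bucket [2], bucket [3], bucket [4, 5])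

-- ===== PRECONDITION & SPEC =====
def Spec_human_senses (id : String) (statement : List String) (out : String × String × String × String × String) : Prop := out = human_senses_alt id statement
instance (id : String) (statement : List String) (out : String × String × String × String × String) : Decidable (Spec_human_senses id statement out) := by unfold Spec_human_senses; infer_instance

-- ===== CLAIM =====
def Claim_equal_human_senses : Prop := ∀ (id : String) (statement : List String), Dom_human_senses id statement → Spec_human_senses id statement (human_senses id statement)

-- ===== LEMMAS AND PROOFS =====

lemma pvSel_cons (a : List Nat) (x : List Char) (xs : List (List Char)) :
    pvSel a (x :: xs) = (if a.contains (pvCat x) then [pvText x] else []) ++ pvSel a xs := by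
  simp only [pvSel, List.filter_cons]
  split_ifs <;> simp

lemma human_step_sel (e s i g o : List (List Char)) (str : String) :
    humanStepA (e, s, i, g, o) str =
      (e ++ pvSel [0] [PySem.Chars.lower str.toList],
       s ++ pvSel [1] [PySem.Chars.lower str.toList],
       i ++ pvSel [2] [PySem.Chars.lower str.toList],
       g ++ pvSel [3] [PySem.Chars.lower str.toList],
       o ++ pvSel [4, 5] [PySem.Chars.lower str.toList]) := by
  simp only [humanStepA, pvSel, List.filter, List.map]
  split_ifs <;> simp_all [pvText, pvCat, pvFireText]

lemma human_loop_sel (ss : List String) : ∀ e s i g o : List (List Char),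
    ss.foldl humanStepA (e, s, i, g, o) =
      (e ++ pvSel [0] (ss.map (fun s => PySem.Chars.lower s.toList)),
       s ++ pvSel [1] (ss.map (fun s => PySem.Chars.lower s.toList)),
       i ++ pvSel [2] (ss.map (fun s => PySem.Chars.lower s.toList)),
       g ++ pvSel [3] (ss.map (fun s => PySem.Chars.lower s.toList)),
       o ++ pvSel [4, 5] (ss.map (fun s => PySem.Chars.lower s.toList))) := by
  induction ss with
  | nil => intro e s i g o; simp [pvSel]
  | cons h t ih =>
      intro e s i g o
      simp only [List.foldl_cons, human_step_sel, List.map_cons, pvSel_cons, ih,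
        List.append_assoc]
      split_ifs <;> simp [pvSel]

-- ===== VERDICT =====
theorem human_senses_spec : Claim_equal_human_senses := by
  intro id statement _
  unfold Spec_human_senses human_senses human_senses_alt
  rw [human_loop_sel]
  simp [pvSel]
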